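-- pv_equiv track=rewrite | github.com/basmulder03/AdventOfCodePython | 2025/day12.py | get_all_orientations
-- ===== SOURCE A (Python) =====
-- from typing import Any, List, Tuple, Set
--
-- def normalize_shape(coords: List[Tuple[int, int]]) -> List[Tuple[int, int]]:
--     """Normalize a shape by moving it to start at (0, 0)."""
--     if not coords:
--         return []
--
--     min_x = min(x for x, y in coords)
--     min_y = min(y for x, y in coords)
--
--     return [(x - min_x, y - min_y) for x, y in coords]
--
-- def rotate_90(coords: List[Tuple[int, int]]) -> List[Tuple[int, int]]:
--     """Rotate coordinates 90 degrees clockwise."""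
--     return [(y, -x) for x, y in coords]
--
-- def flip_horizontal(coords: List[Tuple[int, int]]) -> List[Tuple[int, int]]:
--     """Flip coordinates horizontally."""
--     return [(-x, y) for x, y in coords]
--
-- def get_all_orientations(coords: List[Tuple[int, int]]) -> Set[Tuple[Tuple[int, int], ...]]:
--     """Get all unique orientations (rotations and flips) of a shape."""
--     orientations = set()
--     current = coords[:]
--
--     # Try all 4 rotations
--     for _ in range(4):
--         normalized = normalize_shape(current)
--         orientations.add(tuple(sorted(normalized)))
--
--         # Also try flipped version
--         flipped = flip_horizontal(current)
--         normalized_flipped = normalize_shape(flipped)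
--         orientations.add(tuple(sorted(normalized_flipped)))
--
--         current = rotate_90(current)
--
--     return orientations
-- ===== SOURCE B (Python) =====
-- def _canon(shape):
--     """Normalize to start at (0,0) and return as a sorted tuple."""
--     if shape:
--         mx = min(x for x, y in shape)
--         my = min(y for x, y in shape)
--         shape = [(x - mx, y - my) for x, y in shape]
--     return tuple(sorted(shape))
--
--
-- # The eight dihedral transforms as direct coordinate maps (rotations
-- # interleaved with their horizontal flips).
-- _TRANSFORMS = [
--     lambda x, y: (x, y),
--     lambda x, y: (-x, y),
--     lambda x, y: (y, -x),
--     lambda x, y: (-y, -x),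
--     lambda x, y: (-x, -y),
--     lambda x, y: (x, -y),
--     lambda x, y: (-y, x),
--     lambda x, y: (y, x),
-- ]
--
--
-- def get_all_orientations(coords):
--     """Get all unique orientations (rotations and flips) of a shape."""
--     out = set()
--     for t in _TRANSFORMS:
--         out.add(_canon([t(x, y) for x, y in coords]))
--     return out
-- ===== Notes on version B (the rewrite author's own statement) =====
-- stated objective: alternative
-- what changed: B applies the eight dihedral transforms as independent direct coordinate maps on the original coords instead of threading a mutable rotation state through chained rotate_90 calls in a 4-iteration loop with a per-iteration flip.
import Mathlib
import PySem

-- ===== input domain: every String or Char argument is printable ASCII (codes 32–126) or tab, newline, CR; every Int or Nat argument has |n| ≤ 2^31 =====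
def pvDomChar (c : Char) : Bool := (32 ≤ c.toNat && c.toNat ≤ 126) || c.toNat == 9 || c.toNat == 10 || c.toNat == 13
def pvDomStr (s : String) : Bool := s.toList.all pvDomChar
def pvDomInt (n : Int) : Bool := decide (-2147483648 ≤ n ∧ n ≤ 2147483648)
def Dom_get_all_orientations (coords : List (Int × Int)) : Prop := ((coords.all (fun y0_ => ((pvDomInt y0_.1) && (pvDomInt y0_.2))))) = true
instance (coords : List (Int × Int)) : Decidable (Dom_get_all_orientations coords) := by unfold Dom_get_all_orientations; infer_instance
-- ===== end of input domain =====

-- B applies the eight dihedral transforms as direct coordinate maps instead of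
-- threading a mutable rotation state through rotate_90; same return value.

-- ===== PORT A =====
def normalize_shape (coords : List (Int × Int)) : List (Int × Int) :=
  if coords = [] then []
  else
    let min_x := (PySem.List.min? (coords.map (fun p => p.1)) (fun x => x)).getD 0  -- guarded nonempty, min? = some
    let min_y := (PySem.List.min? (coords.map (fun p => p.2)) (fun x => x)).getD 0
    coords.map (fun p => (p.1 - min_x, p.2 - min_y))

def rotate_90 (coords : List (Int × Int)) : List (Int × Int) :=
  coords.map (fun p => (p.2, -p.1))

def flip_horizontal (coords : List (Int × Int)) : List (Int × Int) :=
  coords.map (fun p => (-p.1, p.2))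

def get_all_orientations (coords : List (Int × Int)) : List (List (Int × Int)) :=
  let st := (PySem.List.pyRange 0 4 1).foldl (fun st _ =>
    let orientations := st.1
    let current := st.2
    let normalized := normalize_shape current
    let orientations := PySem.Set.add orientations
      (PySem.List.sorted2 normalized (fun p => p.1) (fun p => p.2))
    let flipped := flip_horizontal current
    let normalized_flipped := normalize_shape flipped
    let orientations := PySem.Set.add orientations
      (PySem.List.sorted2 normalized_flipped (fun p => p.1) (fun p => p.2))
    (orientations, rotate_90 current)) (PySem.Set.empty, coords)
  st.1

-- ===== PORT B =====
def canon_shape (shape : List (Int × Int)) : List (Int × Int) :=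
  let shape :=
    if shape = [] then shape
    else
      let mx := (PySem.List.min? (shape.map (fun p => p.1)) (fun x => x)).getD 0  -- guarded nonempty, min? = some
      let my := (PySem.List.min? (shape.map (fun p => p.2)) (fun x => x)).getD 0
      shape.map (fun p => (p.1 - mx, p.2 - my))
  PySem.List.sorted2 shape (fun p => p.1) (fun p => p.2)

def dihedral_transforms : List ((Int × Int) → (Int × Int)) :=
  [fun p => (p.1, p.2), fun p => (-p.1, p.2),
   fun p => (p.2, -p.1), fun p => (-p.2, -p.1),
   fun p => (-p.1, -p.2), fun p => (p.1, -p.2),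
   fun p => (-p.2, p.1), fun p => (p.2, p.1)]

def get_all_orientations_alt (coords : List (Int × Int)) : List (List (Int × Int)) :=
  dihedral_transforms.foldl
    (fun out t => PySem.Set.add out (canon_shape (coords.map t))) PySem.Set.empty

-- ===== PRECONDITION & SPEC =====
def Spec_get_all_orientations (coords : List (Int × Int)) (out : List (List (Int × Int))) : Prop := out = get_all_orientations_alt coords
instance (coords : List (Int × Int)) (out : List (List (Int × Int))) : Decidable (Spec_get_all_orientations coords out) := by unfold Spec_get_all_orientations; infer_instance

-- ===== CLAIM (what is proved, stated in full; the proofs are below) =====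
def Claim_equal_get_all_orientations : Prop := ∀ (coords : List (Int × Int)), Dom_get_all_orientations coords → Spec_get_all_orientations coords (get_all_orientations coords)

-- ===== LEMMAS AND PROOFS =====
theorem canon_shape_eq (x : List (Int × Int)) :
    canon_shape x = PySem.List.sorted2 (normalize_shape x) (fun p => p.1) (fun p => p.2) := by
  by_cases h : x = [] <;> simp [canon_shape, normalize_shape, h]

theorem pyRange4 : PySem.List.pyRange 0 4 1 = [0, 1, 2, 3] := by decide

-- ===== VERDICT (by name: the statement is the Claim_ definition above) =====
theorem get_all_orientations_spec : Claim_equal_get_all_orientations := by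
  intro coords _
  show get_all_orientations coords = get_all_orientations_alt coords
  simp only [get_all_orientations, get_all_orientations_alt, dihedral_transforms,
    pyRange4, List.foldl, rotate_90, flip_horizontal, canon_shape_eq, List.map_map,
    Function.comp_def]
  norm_num
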